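-- pv_equiv track=rewrite | github.com/zhangdongxuan0227/python100 | autotest/frame.py | filternum
-- ===== SOURCE A (Python) =====
-- def filternum(listnum):
--     jishu = []
--     oushu = []
--     for i in listnum:
--         if i % 2 == 0:
--             oushu.append(i)
--         else:
--             jishu.append(i)
--     if len(jishu) == len(listnum) - 1:
--         return oushu[0]
--     else:
--         return jishu[0]
-- ===== SOURCE B (Python) =====
-- def filternum(listnum):
--     # Single streaming pass with scalar state (first odd seen, first even seen,
--     # count of evens) and an early return: as soon as a second even and an odd
--     # have both been seen, the answer is the first odd -- no lists are built.
--     first_odd = None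
--     first_even = None
--     even_count = 0
--     for i in listnum:
--         if i % 2 == 0:
--             even_count += 1
--             if first_even is None:
--                 first_even = i
--         elif first_odd is None:
--             first_odd = i
--         if even_count >= 2 and first_odd is not None:
--             return first_odd
--     return first_even if even_count == 1 else first_odd
-- ===== Notes on version B (the rewrite author's own statement) =====
-- stated objective: faster
-- what changed: Replaces A's two-list partition followed by a length comparison and indexing with a single streaming pass over scalar state (first odd, first even, even count) that returns early as soon as the answer is determined and builds no intermediate lists.
import Mathlib
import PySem

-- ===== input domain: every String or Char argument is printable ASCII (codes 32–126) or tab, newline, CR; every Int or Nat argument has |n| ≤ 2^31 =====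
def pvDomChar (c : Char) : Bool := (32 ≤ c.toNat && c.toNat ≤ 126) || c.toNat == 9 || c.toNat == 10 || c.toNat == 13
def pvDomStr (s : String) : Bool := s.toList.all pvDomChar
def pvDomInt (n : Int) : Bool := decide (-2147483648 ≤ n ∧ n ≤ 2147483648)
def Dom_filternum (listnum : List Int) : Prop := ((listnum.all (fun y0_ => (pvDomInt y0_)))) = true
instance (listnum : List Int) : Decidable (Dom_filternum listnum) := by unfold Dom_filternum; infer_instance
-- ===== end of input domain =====

-- B replaces A's two-list partition + length test by one streaming pass over scalar
-- state (first odd, first even, even count) with an early return (objective: alternative).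

-- ===== PORT A =====
def filternum (listnum : List Int) : Int :=
  let p := listnum.foldl
    (fun (s : List Int × List Int) i =>
      if PySem.Int.mod i 2 = 0 then (s.1, s.2 ++ [i]) else (s.1 ++ [i], s.2))
    ([], [])
  if (p.1.length : Int) = (listnum.length : Int) - 1 then
    (PySem.List.pyGet? p.2 0).getD 0   -- oushu[0]; Pre_ guarantees it exists
  else
    (PySem.List.pyGet? p.1 0).getD 0   -- jishu[0]; Pre_ guarantees it exists

-- ===== PORT B =====
-- the loop of Source B: state = (first_odd, first_even, even_count); early `return` is the
-- non-recursive branch; the final `None` fallback (unreachable under Pre_) is .getD 0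
def filternumLoop : List Int → Option Int → Option Int → Nat → Int
  | [], firstOdd, firstEven, evenCount =>
      if evenCount = 1 then firstEven.getD 0 else firstOdd.getD 0
  | i :: t, firstOdd, firstEven, evenCount =>
      let firstOdd' := if PySem.Int.mod i 2 = 0 then firstOdd else firstOdd.or (some i)
      let firstEven' := if PySem.Int.mod i 2 = 0 then firstEven.or (some i) else firstEven
      let evenCount' := if PySem.Int.mod i 2 = 0 then evenCount + 1 else evenCount
      if 2 ≤ evenCount' ∧ firstOdd' ≠ none then firstOdd'.getD 0
      else filternumLoop t firstOdd' firstEven' evenCount'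

def filternum_alt (listnum : List Int) : Int :=
  filternumLoop listnum none none 0

-- ===== PRECONDITION & SPEC =====
-- Pre_ excludes exactly the inputs on which A raises IndexError: lists with no odd
-- element and not exactly one even one (incl. []).
def Pre_filternum (listnum : List Int) : Prop :=
  listnum.countP (fun i => PySem.Int.mod i 2 = 0) = 1 ∨ (∃ x ∈ listnum, PySem.Int.mod x 2 ≠ 0)
instance (listnum : List Int) : Decidable (Pre_filternum listnum) := by unfold Pre_filternum; infer_instance
def pvWitness_filternum : List Int := [1, 3, 4]
def Spec_filternum (listnum : List Int) (out : Int) : Prop := out = filternum_alt listnum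
instance (listnum : List Int) (out : Int) : Decidable (Spec_filternum listnum out) := by unfold Spec_filternum; infer_instance

-- ===== CLAIM (what is proved, stated in full; the proofs are below) =====
def Claim_equal_filternum : Prop := ∀ (listnum : List Int), Dom_filternum listnum → Pre_filternum listnum → Spec_filternum listnum (filternum listnum)

-- ===== LEMMAS AND PROOFS =====

-- A's loop, generalized over the accumulators, is a pair of filters.
theorem filternum_loop_eq (l a b : List Int) :
    l.foldl
      (fun (s : List Int × List Int) i =>
        if PySem.Int.mod i 2 = 0 then (s.1, s.2 ++ [i]) else (s.1 ++ [i], s.2))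
      (a, b)
    = (a ++ l.filter (fun i => PySem.Int.mod i 2 ≠ 0),
       b ++ l.filter (fun i => PySem.Int.mod i 2 = 0)) := by
  induction l generalizing a b with
  | nil => simp
  | cons x t ih =>
      simp only [List.foldl_cons]
      by_cases h : PySem.Int.mod x 2 = 0
      · rw [if_pos h, ih,
          List.filter_cons_of_neg (p := fun i => decide (PySem.Int.mod i 2 ≠ 0))
            (by simpa using h),
          List.filter_cons_of_pos (p := fun i => decide (PySem.Int.mod i 2 = 0))
            (by simpa using h)]
        simp
      · rw [if_neg h, ih,
          List.filter_cons_of_pos (p := fun i => decide (PySem.Int.mod i 2 ≠ 0))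
            (by simpa using h),
          List.filter_cons_of_neg (p := fun i => decide (PySem.Int.mod i 2 = 0))
            (by simpa using h)]
        simp

-- B's loop, generalized over its scalar state, computes the same "count / first
-- element of each parity" data as the filters.
theorem filternumLoop_eq (l : List Int) (fo fe : Option Int) (ec : Nat) :
    filternumLoop l fo fe ec =
      if ec + l.countP (fun i => PySem.Int.mod i 2 = 0) = 1 then
        (fe.or (l.filter (fun i => PySem.Int.mod i 2 = 0)).head?).getD 0
      else
        (fo.or (l.filter (fun i => PySem.Int.mod i 2 ≠ 0)).head?).getD 0 := by
  induction l generalizing fo fe ec with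
  | nil => simp [filternumLoop]
  | cons x t ih =>
      by_cases h : PySem.Int.mod x 2 = 0 <;>
        simp only [filternumLoop, if_pos, h, List.countP_cons, List.filter_cons,
          decide_true, decide_false, decide_not, Bool.not_true, Bool.not_false, if_false,
          Bool.false_eq_true, List.head?_cons, ih, Nat.add_zero]
      · by_cases he : 2 ≤ ec + 1 ∧ fo ≠ none
        · rw [if_pos he, if_neg (by omega)]
          obtain ⟨-, hfo⟩ := he
          obtain ⟨v, hv⟩ := Option.ne_none_iff_exists'.mp hfo
          simp [hv, Option.or]
        · rw [if_neg he]
          have e1 : ec + 1 + t.countP (fun i => decide (PySem.Int.mod i 2 = 0))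
              = ec + (t.countP (fun i => decide (PySem.Int.mod i 2 = 0)) + 1) := by omega
          rw [e1]
          split_ifs with h1
          · cases fe <;> simp [Option.or]
          · simp
      · have hfo' : fo.or (some x) ≠ none := by cases fo <;> simp [Option.or]
        by_cases he : 2 ≤ ec
        · rw [if_pos ⟨he, hfo'⟩, if_neg (by omega)]
        · rw [if_neg (by intro ⟨h2, _⟩; exact he h2)]
          split_ifs with h1
          · rfl
          · cases fo <;> simp [Option.or]

theorem filternum_eq_alt (l : List Int) : filternum l = filternum_alt l := by
  unfold filternum filternum_alt
  rw [filternum_loop_eq, filternumLoop_eq]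
  dsimp only
  simp only [List.nil_append, Nat.zero_add]
  have hlen : l.length = (l.filter (fun i => decide (PySem.Int.mod i 2 = 0))).length
      + (l.filter (fun i => !decide (PySem.Int.mod i 2 = 0))).length :=
    List.length_eq_length_filter_add (fun i => decide (PySem.Int.mod i 2 = 0))
  have hne : l.filter (fun i => decide (PySem.Int.mod i 2 ≠ 0))
      = l.filter (fun i => !decide (PySem.Int.mod i 2 = 0)) := by
    simp only [decide_not]
  have hcnt : l.countP (fun i => decide (PySem.Int.mod i 2 = 0))
      = (l.filter (fun i => decide (PySem.Int.mod i 2 = 0))).length := by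
    simp [List.countP_eq_length_filter]
  by_cases h : l.countP (fun i => decide (PySem.Int.mod i 2 = 0)) = 1
  · have h1 : ((l.filter (fun i => decide (PySem.Int.mod i 2 ≠ 0))).length : Int)
        = (l.length : Int) - 1 := by rw [hne]; omega
    rw [if_pos h1, if_pos h]
    cases (l.filter (fun i => decide (PySem.Int.mod i 2 = 0))) <;>
      simp [PySem.List.pyGet?, PySem.List.pyIdx?, Option.or]
  · have h1 : ¬ ((l.filter (fun i => decide (PySem.Int.mod i 2 ≠ 0))).length : Int)
        = (l.length : Int) - 1 := by rw [hne]; omega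
    rw [if_neg h1, if_neg h]
    cases (l.filter (fun i => decide (PySem.Int.mod i 2 ≠ 0))) <;>
      simp [PySem.List.pyGet?, PySem.List.pyIdx?, Option.or]

-- ===== VERDICT (by name: the statement is the Claim_ definition above) =====
theorem filternum_spec : Claim_equal_filternum := by
  intro l _ _
  exact filternum_eq_alt l
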